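-- pv_equiv track=rewrite | github.com/TransluceAI/docent | lib/lucepkg/lucepkg/commands/setup.py | _remove_ssh_host
-- ===== SOURCE A (Python) =====
-- def _remove_ssh_host(old_config: str, host: str) -> str:
--     """Remove a Host block from SSH config.
--
--     Args:
--         old_config: Existing SSH config contents
--         host: Host to remove (exact match after "Host ")
--
--     Returns:
--         Updated SSH config contents with the host removed
--     """
--     lines = old_config.splitlines()
--     result: list[str] = []
--     i = 0
--
--     while i < len(lines):
--         # Check for Host or Match directive, ignoring whitespace
--         if lines[i].strip().startswith(("Host ", "Match ")):
--             if lines[i].strip() == f"Host {host}":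
--                 # Found our host - skip the block
--                 while i < len(lines):
--                     if i == len(lines) - 1 or lines[i + 1].strip().startswith(("Host ", "Match ")):
--                         break
--                     i += 1
--             else:
--                 # Different host - keep original line
--                 result.append(lines[i])
--         else:
--             # Keep original line
--             result.append(lines[i])
--         i += 1
--
--     return "\n".join(result)
-- ===== SOURCE B (Python) =====
-- def _remove_ssh_host(old_config: str, host: str) -> str:
--     """Remove a Host block from SSH config (block-list decomposition)."""
--
--     def is_header(line: str) -> bool:
--         s = line.strip()
--         return s.startswith("Host ") or s.startswith("Match ")
--
--     # Phase 1: group lines into blocks (preamble block first, then one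
--     # block per Host/Match directive).
--     blocks: list[list[str]] = [[]]
--     for line in old_config.splitlines():
--         if is_header(line):
--             blocks.append([line])
--         else:
--             blocks[-1].append(line)
--
--     # Phase 2: keep every block whose header is not the one to remove.
--     target = f"Host {host}"
--     out: list[str] = []
--     for block in blocks:
--         if not (block and block[0].strip() == target):
--             out.extend(block)
--
--     return "\n".join(out)
-- ===== Notes on version B (the rewrite author's own statement) =====
-- stated objective: alternative
-- what changed: Replaces A's index-driven while loop with a nested skip-while by a two-phase group-then-filter: lines are first grouped into blocks (preamble plus one block per Host/Match header), then every block whose header is not the removed host is emitted.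
import Mathlib
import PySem

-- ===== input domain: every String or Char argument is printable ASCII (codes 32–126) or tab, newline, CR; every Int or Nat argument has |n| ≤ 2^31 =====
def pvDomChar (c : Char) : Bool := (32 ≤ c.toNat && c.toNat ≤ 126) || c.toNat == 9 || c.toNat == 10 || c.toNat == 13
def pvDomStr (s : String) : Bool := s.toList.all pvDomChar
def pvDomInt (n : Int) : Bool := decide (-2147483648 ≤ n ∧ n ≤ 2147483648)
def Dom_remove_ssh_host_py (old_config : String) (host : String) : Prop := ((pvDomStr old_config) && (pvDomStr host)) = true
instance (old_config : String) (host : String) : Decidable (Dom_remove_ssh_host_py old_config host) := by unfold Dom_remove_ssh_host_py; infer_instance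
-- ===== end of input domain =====

-- B replaces A's index-based skip-while loop by a group-into-blocks-then-filter two-phase pass; return values proved equal on all inputs.

-- ===== PORT A =====
-- lines[i].strip().startswith(("Host ", "Match "))
def pvIsHdr (l : String) : Bool :=
  PySem.Str.startswith (PySem.Str.strip l) "Host " || PySem.Str.startswith (PySem.Str.strip l) "Match "

-- the inner 'while i < len(lines): if i == len(lines)-1 or lines[i+1]... : break; i += 1'
def pvSkipA (lines : List String) (i : Nat) : Nat :=
  if h : i < lines.length then
    if i == lines.length - 1 || pvIsHdr (lines.getD (i+1) "") then i
    else pvSkipA lines (i+1)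
  else i
termination_by lines.length - i
decreasing_by omega

-- needed by pvLoopA's termination proof
theorem pvSkipA_ge (lines : List String) (i : Nat) : i ≤ pvSkipA lines i := by
  rw [pvSkipA]
  split_ifs with h1 h2
  · exact Nat.le_refl i
  · exact Nat.le_trans (Nat.le_succ i) (pvSkipA_ge lines (i+1))
  · exact Nat.le_refl i
termination_by lines.length - i
decreasing_by omega

-- the outer 'while i < len(lines)' with accumulator 'result'
def pvLoopA (lines : List String) (tgt : String) (res : List String) (i : Nat) : List String :=
  if h : i < lines.length then
    if pvIsHdr (lines.getD i "") then
      if PySem.Str.strip (lines.getD i "") == tgt then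
        pvLoopA lines tgt res (pvSkipA lines i + 1)
      else pvLoopA lines tgt (res ++ [lines.getD i ""]) (i+1)
    else pvLoopA lines tgt (res ++ [lines.getD i ""]) (i+1)
  else res
termination_by lines.length - i
decreasing_by
  · have := pvSkipA_ge lines i; omega
  · omega
  · omega

def remove_ssh_host_py (old_config : String) (host : String) : String :=
  PySem.Str.join "\n" (pvLoopA (PySem.Str.splitlines old_config) ("Host " ++ host) [] 0)

-- ===== PORT B =====
-- blocks[-1].append(line)
def pvAppendLast (blocks : List (List String)) (line : String) : List (List String) :=
  blocks.dropLast ++ [(blocks.getLast?.getD []) ++ [line]]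

-- body of B's first (grouping) loop
def pvBStep (blocks : List (List String)) (line : String) : List (List String) :=
  if pvIsHdr line then blocks ++ [[line]] else pvAppendLast blocks line

-- 'not (block and block[0].strip() == target)'
def pvKeep (tgt : String) (b : List String) : Bool :=
  match b with
  | [] => true
  | h :: _ => !(PySem.Str.strip h == tgt)

def remove_ssh_host_py_alt (old_config : String) (host : String) : String :=
  let blocks := (PySem.Str.splitlines old_config).foldl pvBStep [[]]
  let tgt := "Host " ++ host
  let out := blocks.foldl (fun out b => if pvKeep tgt b then out ++ b else out) []
  PySem.Str.join "\n" out

-- ===== PRECONDITION & SPEC =====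
def Spec_remove_ssh_host_py (old_config : String) (host : String) (out : String) : Prop := out = remove_ssh_host_py_alt old_config host
instance (old_config : String) (host : String) (out : String) : Decidable (Spec_remove_ssh_host_py old_config host out) := by unfold Spec_remove_ssh_host_py; infer_instance

-- ===== CLAIM (what is proved, stated in full; the proofs are below) =====
def Claim_equal_remove_ssh_host_py : Prop := ∀ (old_config : String) (host : String), Dom_remove_ssh_host_py old_config host → Spec_remove_ssh_host_py old_config host (remove_ssh_host_py old_config host)

-- ===== LEMMAS AND PROOFS =====

-- common functional spec: A's kept lines, as structural recursion over the line list
def pvG (tgt : String) : List String → List String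
  | [] => []
  | l :: rest =>
    if pvIsHdr l then
      if PySem.Str.strip l == tgt then pvG tgt (List.dropWhile (fun x => !pvIsHdr x) rest)
      else l :: pvG tgt rest
    else l :: pvG tgt rest
termination_by ls => ls.length
decreasing_by
  · have := List.length_dropWhile_le (fun x => !pvIsHdr x) rest; simp; omega
  · simp
  · simp

-- B's grouping, as structural recursion with the current block as accumulator
def pvGrp (cur : List String) : List String → List (List String)
  | [] => [cur]
  | l :: rest => if pvIsHdr l then cur :: pvGrp [l] rest else pvGrp (cur ++ [l]) rest

-- B's filtered flattening
def pvOutFlat (tgt : String) : List (List String) → List String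
  | [] => []
  | b :: bs => (if pvKeep tgt b then b else []) ++ pvOutFlat tgt bs

theorem pv_match_isHdr (l host : String) (h : (PySem.Str.strip l == ("Host " ++ host)) = true) :
    pvIsHdr l = true := by
  have he : PySem.Str.strip l = "Host " ++ host := by exact_mod_cast (beq_iff_eq).mp h
  unfold pvIsHdr
  rw [he]
  have : PySem.Str.startswith ("Host " ++ host) "Host " = true := by
    simp only [PySem.Str.startswith_eq]
    rw [PySem.Chars.startswith_iff]
    rw [String.toList_append]
    exact List.prefix_append _ _
  simp only [this, Bool.true_or]

theorem pvSkipA_drop (lines : List String) (i : Nat) (h : i < lines.length) :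
    lines.drop (pvSkipA lines i + 1) = List.dropWhile (fun x => !pvIsHdr x) (lines.drop (i+1)) := by
  rw [pvSkipA]
  rw [dif_pos h]
  by_cases hstop : (i == lines.length - 1 || pvIsHdr (lines.getD (i+1) "")) = true
  · rw [if_pos hstop]
    rcases Bool.or_eq_true_iff.mp hstop with hlast | hhdr
    · have : i = lines.length - 1 := by simpa using hlast
      have : lines.drop (i+1) = [] := List.drop_eq_nil_of_le (by omega)
      rw [this]; rfl
    · have hlt : i + 1 < lines.length := by
        by_contra hge
        have : lines.getD (i+1) "" = "" := by
          simp [List.getD_eq_getElem?_getD, List.getElem?_eq_none (by omega : lines.length ≤ i+1)]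
        rw [this] at hhdr
        have hf : pvIsHdr "" = false := by decide
        rw [hf] at hhdr
        exact Bool.false_ne_true hhdr
      rw [List.drop_eq_getElem_cons hlt, List.dropWhile_cons]
      have : lines.getD (i+1) "" = lines[i+1] := by
        simp [List.getD_eq_getElem?_getD, List.getElem?_eq_getElem hlt]
      rw [this] at hhdr
      simp [hhdr]
  · rw [if_neg hstop]
    have hne : i ≠ lines.length - 1 := by
      intro he; apply hstop; simp [he]
    have hlt : i + 1 < lines.length := by omega
    have ih := pvSkipA_drop lines (i+1) hlt
    rw [ih]
    rw [List.drop_eq_getElem_cons hlt, List.dropWhile_cons]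
    have hget : lines.getD (i+1) "" = lines[i+1] := by
      simp [List.getD_eq_getElem?_getD, List.getElem?_eq_getElem hlt]
    have hnh : pvIsHdr lines[i+1] = false := by
      rw [← hget]
      cases hx : pvIsHdr (lines.getD (i+1) "") with
      | false => rfl
      | true => exact absurd (by rw [Bool.or_eq_true_iff]; exact Or.inr hx) hstop
    simp [hnh]
termination_by lines.length - i
decreasing_by omega

theorem pvLoopA_eq_pvG (lines : List String) (tgt : String) (res : List String) (i : Nat) :
    pvLoopA lines tgt res i = res ++ pvG tgt (lines.drop i) := by
  rw [pvLoopA]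
  by_cases h : i < lines.length
  · rw [dif_pos h]
    have hget : lines.getD i "" = lines[i] := by
      simp [List.getD_eq_getElem?_getD, List.getElem?_eq_getElem h]
    have hdrop : lines.drop i = lines[i] :: lines.drop (i+1) := List.drop_eq_getElem_cons h
    rw [hget, hdrop]
    by_cases hh : pvIsHdr lines[i] = true
    · rw [if_pos hh]
      by_cases hm : (PySem.Str.strip lines[i] == tgt) = true
      · rw [if_pos hm]
        rw [pvLoopA_eq_pvG lines tgt res (pvSkipA lines i + 1)]
        rw [pvSkipA_drop lines i h]
        rw [pvG]
        simp [hh, hm]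
      · rw [if_neg hm]
        rw [pvLoopA_eq_pvG lines tgt (res ++ [lines[i]]) (i+1)]
        rw [pvG]
        simp [hh, hm]
    · rw [if_neg hh]
      rw [pvLoopA_eq_pvG lines tgt (res ++ [lines[i]]) (i+1)]
      rw [pvG]
      simp [hh]
  · rw [dif_neg h]
    have : lines.drop i = [] := List.drop_eq_nil_of_le (by omega)
    rw [this]
    simp [pvG]
termination_by lines.length - i
decreasing_by
  · have := pvSkipA_ge lines i; omega
  · omega
  · omega

theorem pvFoldl_bstep (ls : List String) : ∀ (bs : List (List String)) (cur : List String),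
    ls.foldl pvBStep (bs ++ [cur]) = bs ++ pvGrp cur ls := by
  induction ls with
  | nil => intro bs cur; simp [pvGrp]
  | cons l rest ih =>
    intro bs cur
    rw [List.foldl_cons]
    by_cases hh : pvIsHdr l = true
    · have : pvBStep (bs ++ [cur]) l = (bs ++ [cur]) ++ [[l]] := by simp [pvBStep, hh]
      rw [this, ih (bs ++ [cur]) [l]]
      simp [pvGrp, hh]
    · have : pvBStep (bs ++ [cur]) l = bs ++ [cur ++ [l]] := by
        simp [pvBStep, hh, pvAppendLast]
      rw [this, ih bs (cur ++ [l])]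
      simp [pvGrp, hh]

theorem pvFoldl_filter (tgt : String) (bl : List (List String)) :
    ∀ (acc : List String),
    bl.foldl (fun out b => if pvKeep tgt b then out ++ b else out) acc = acc ++ pvOutFlat tgt bl := by
  induction bl with
  | nil => intro acc; simp [pvOutFlat]
  | cons b bs ih =>
    intro acc
    rw [List.foldl_cons]
    by_cases hk : pvKeep tgt b = true
    · rw [if_pos hk, ih (acc ++ b)]
      simp [pvOutFlat, hk]
    · rw [if_neg hk, ih acc]
      simp [pvOutFlat, hk]

theorem pvKeep_concat (tgt : String) (cur : List String) (l : String) (hc : cur ≠ []) :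
    pvKeep tgt (cur ++ [l]) = pvKeep tgt cur := by
  cases cur with
  | nil => exact absurd rfl hc
  | cons h t => simp [pvKeep]

-- the heart: grouping-then-filtering equals A's single-pass kept-line list
theorem pvMain (host : String) (ls : List String) :
    (∀ cur, pvKeep ("Host " ++ host) cur = true →
        pvOutFlat ("Host " ++ host) (pvGrp cur ls) = cur ++ pvG ("Host " ++ host) ls) ∧
    (∀ cur, pvKeep ("Host " ++ host) cur = false →
        pvOutFlat ("Host " ++ host) (pvGrp cur ls) =
          pvG ("Host " ++ host) (List.dropWhile (fun x => !pvIsHdr x) ls)) := by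
  induction ls with
  | nil =>
    constructor
    · intro cur hk; simp [pvGrp, pvOutFlat, pvG, hk]
    · intro cur hk; simp [pvGrp, pvOutFlat, hk, List.dropWhile, pvG]
  | cons l rest ih =>
    have tgt := "Host " ++ host
    constructor
    · intro cur hk
      by_cases hh : pvIsHdr l = true
      · rw [pvGrp]; rw [if_pos hh]
        rw [pvOutFlat]
        rw [if_pos hk]
        by_cases hm : (PySem.Str.strip l == ("Host " ++ host)) = true
        · have hk2 : pvKeep ("Host " ++ host) [l] = false := by simp [pvKeep, hm]
          rw [ih.2 [l] hk2]
          rw [pvG]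
          simp [hh, hm]
        · have hk2 : pvKeep ("Host " ++ host) [l] = true := by simp [pvKeep, hm]
          rw [ih.1 [l] hk2]
          rw [pvG]
          simp [hh, hm]
      · rw [pvGrp]; rw [if_neg hh]
        have hk2 : pvKeep ("Host " ++ host) (cur ++ [l]) = true := by
          cases cur with
          | nil =>
            simp only [List.nil_append, pvKeep]
            by_cases hm : (PySem.Str.strip l == ("Host " ++ host)) = true
            · exact absurd (pv_match_isHdr l host hm) hh
            · simp [hm]
          | cons c t => rw [pvKeep_concat _ _ _ (by simp)]; exact hk
        rw [ih.1 (cur ++ [l]) hk2]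
        rw [pvG]
        simp [hh]
    · intro cur hk
      by_cases hh : pvIsHdr l = true
      · rw [pvGrp]; rw [if_pos hh]
        rw [pvOutFlat]
        rw [if_neg (by simp [hk])]
        have hdw : List.dropWhile (fun x => !pvIsHdr x) (l :: rest) = l :: rest := by
          rw [List.dropWhile_cons]; simp [hh]
        rw [hdw]
        by_cases hm : (PySem.Str.strip l == ("Host " ++ host)) = true
        · have hk2 : pvKeep ("Host " ++ host) [l] = false := by simp [pvKeep, hm]
          rw [ih.2 [l] hk2]
          rw [pvG]
          simp [hh, hm]
        · have hk2 : pvKeep ("Host " ++ host) [l] = true := by simp [pvKeep, hm]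
          rw [ih.1 [l] hk2]
          rw [pvG]
          simp [hh, hm]
      · rw [pvGrp]; rw [if_neg hh]
        have hcne : cur ≠ [] := by
          intro he; rw [he] at hk; simp [pvKeep] at hk
        have hk2 : pvKeep ("Host " ++ host) (cur ++ [l]) = false := by
          rw [pvKeep_concat _ _ _ hcne]; exact hk
        rw [ih.2 (cur ++ [l]) hk2]
        have hdw : List.dropWhile (fun x => !pvIsHdr x) (l :: rest) =
            List.dropWhile (fun x => !pvIsHdr x) rest := by
          rw [List.dropWhile_cons]; simp [hh]
        rw [hdw]

-- ===== VERDICT (by name: the statement is the Claim_ definition above) =====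
theorem remove_ssh_host_py_spec : Claim_equal_remove_ssh_host_py := by
  intro old_config host _
  unfold Spec_remove_ssh_host_py remove_ssh_host_py remove_ssh_host_py_alt
  have hA : pvLoopA (PySem.Str.splitlines old_config) ("Host " ++ host) [] 0 =
      pvG ("Host " ++ host) (PySem.Str.splitlines old_config) := by
    rw [pvLoopA_eq_pvG]; simp
  have hB1 : (PySem.Str.splitlines old_config).foldl pvBStep [[]] =
      pvGrp [] (PySem.Str.splitlines old_config) := by
    have := pvFoldl_bstep (PySem.Str.splitlines old_config) [] []
    simpa using this
  have hB2 := pvFoldl_filter ("Host " ++ host) (pvGrp [] (PySem.Str.splitlines old_config)) []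
  have hM := (pvMain host (PySem.Str.splitlines old_config)).1 [] (by simp [pvKeep])
  simp only [hA, hB1, hB2, hM]
  simp
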